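-- pv_equiv track=rewrite | github.com/billrunge/billbot-discord | modules/on_message/emoji_letters.py | getLongestWordWithDistinctLetters
-- ===== SOURCE A (Python) =====
-- from collections import Counter
--
-- def isUniqueChars(string):
--     freq = Counter(string)
--     if(len(freq) == len(string)):
--         return True
--     else:
--         return False
--
-- def getLongestWordWithDistinctLetters(word_array):
--     longest_length = 0
--     longest_word = ''
--     for word in word_array:
--         word = ''.join(c for c in word if c.isalpha())
--         word = word.upper()
--         if (len(word) > longest_length and isUniqueChars(word)):
--             longest_word = word
--             longest_length = len(word)
--     return longest_word
-- ===== SOURCE B (Python) =====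
-- def getLongestWordWithDistinctLetters(word_array):
--     cleaned = [''.join(c for c in w if c.isalpha()).upper() for w in word_array]
--     for word in sorted(cleaned, key=len, reverse=True):
--         if len(set(word)) == len(word):
--             return word
--     return ''
-- ===== Notes on version B (the rewrite author's own statement) =====
-- stated objective: alternative
-- what changed: Replaces A's single max-tracking pass with a sort-then-select shape: clean all words, stable-sort by length descending, and return the first word whose letters are all distinct.
import Mathlib
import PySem

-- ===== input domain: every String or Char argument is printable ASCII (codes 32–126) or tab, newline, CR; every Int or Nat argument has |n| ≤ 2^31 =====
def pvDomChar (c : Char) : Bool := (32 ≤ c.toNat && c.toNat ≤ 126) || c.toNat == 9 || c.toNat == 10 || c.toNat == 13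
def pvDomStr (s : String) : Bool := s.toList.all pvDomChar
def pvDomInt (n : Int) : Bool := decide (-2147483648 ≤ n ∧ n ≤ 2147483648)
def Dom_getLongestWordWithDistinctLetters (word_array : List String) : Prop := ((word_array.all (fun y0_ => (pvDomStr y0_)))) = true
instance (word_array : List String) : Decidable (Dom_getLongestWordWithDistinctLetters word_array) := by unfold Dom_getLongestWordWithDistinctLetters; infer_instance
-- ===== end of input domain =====

-- B replaces A's max-tracking pass with a sort-then-select shape (stable sort by length descending,
-- then first all-distinct word); same result, no speed claim.


-- ===== PORT A =====
-- isUniqueChars: len(Counter(string)) == len(string)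
def isUniqueChars (s : List Char) : Bool :=
  if PySem.Dict.size (PySem.Dict.counter s) == s.length then true else false

def getLongestWordWithDistinctLetters (word_array : List String) : String :=
  let r := word_array.foldl
    (fun (st : Int × List Char) word =>
      let w := word.toList.filter PySem.Chars.isalpha      -- ''.join(c for c in word if c.isalpha())
      let w := w.map PySem.Chars.upperChar                 -- word.upper()
      if decide ((w.length : Int) > st.1) && isUniqueChars w then ((w.length : Int), w) else st)
    (0, [])
  String.ofList r.2

-- ===== PORT B =====
-- ''.join(c for c in w if c.isalpha()).upper()
def pvCleanB (w : String) : List Char := PySem.Chars.upper (w.toList.filter PySem.Chars.isalpha)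

-- len(set(word)) == len(word)
def pvDistinctB (w : List Char) : Bool := PySem.Set.len (PySem.Set.ofList w) == (w.length : Int)

def getLongestWordWithDistinctLetters_alt (word_array : List String) : String :=
  let cleaned := word_array.map pvCleanB
  match (PySem.List.sorted cleaned (fun w => (w.length : Int)) true).find? pvDistinctB with
  | some word => String.ofList word
  | none => ""

-- ===== PRECONDITION & SPEC =====
def Spec_getLongestWordWithDistinctLetters (word_array : List String) (out : String) : Prop := out = getLongestWordWithDistinctLetters_alt word_array
instance (word_array : List String) (out : String) : Decidable (Spec_getLongestWordWithDistinctLetters word_array out) := by unfold Spec_getLongestWordWithDistinctLetters; infer_instance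

-- ===== CLAIM (what is proved, stated in full; the proofs are below) =====
def Claim_equal_getLongestWordWithDistinctLetters : Prop := ∀ (word_array : List String), Dom_getLongestWordWithDistinctLetters word_array → Spec_getLongestWordWithDistinctLetters word_array (getLongestWordWithDistinctLetters word_array)

-- ===== LEMMAS AND PROOFS =====

-- the two distinctness tests agree
lemma uniq_eq (s : List Char) : isUniqueChars s = pvDistinctB s := by
  have hk : (PySem.Dict.counter s).keys = PySem.Set.ofList s := PySem.Dict.keys_counter s
  have hlen : PySem.Dict.size (PySem.Dict.counter s) = (PySem.Set.ofList s).length := by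
    have : (PySem.Dict.counter s).keys.length = (PySem.Set.ofList s).length := by rw [hk]
    simpa [PySem.Dict.keys, PySem.Dict.size] using this
  simp only [isUniqueChars, pvDistinctB, PySem.Set.len, hlen]
  by_cases h : (PySem.Set.ofList s).length = s.length <;> simp [h]

-- A's step ignores non-distinct words: fold over xs = simplified fold over xs.filter
def pvStep' (st : Int × List Char) (w : List Char) : Int × List Char :=
  if (w.length : Int) > st.1 then ((w.length : Int), w) else st

lemma foldl_filter_uniq (xs : List (List Char)) :
    ∀ init, xs.foldl (fun st w => if decide ((w.length : Int) > st.1) && isUniqueChars w then ((w.length : Int), w) else st) init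
      = (xs.filter pvDistinctB).foldl pvStep' init := by
  induction xs with
  | nil => intro init; rfl
  | cons w t ih =>
    intro init
    rw [List.foldl_cons, List.filter_cons]
    by_cases hu : pvDistinctB w
    · have hstep : (if decide ((w.length : Int) > init.1) && isUniqueChars w then ((w.length : Int), w) else init) = pvStep' init w := by
        simp [pvStep', uniq_eq, hu]
      rw [hstep, if_pos hu, List.foldl_cons]
      exact ih _
    · have hstep : (if decide ((w.length : Int) > init.1) && isUniqueChars w then ((w.length : Int), w) else init) = init := by
        simp [uniq_eq, Bool.eq_false_iff.mpr hu]
      rw [hstep, if_neg hu]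
      exact ih _

-- insertBy into a key-descending list commutes with filter
lemma filter_insertBy (p : List Char → Bool) (key : List Char → Int) (w : List Char) :
    ∀ L : List (List Char), L.Pairwise (fun a b => key b ≤ key a) →
    (PySem.List.insertBy (fun a b => decide (key b < key a)) w L).filter p
      = if p w then PySem.List.insertBy (fun a b => decide (key b < key a)) w (L.filter p)
        else L.filter p := by
  intro L
  induction L with
  | nil => intro _; by_cases hp : p w <;> simp [PySem.List.insertBy, List.filter, hp]
  | cons h t ih =>
    intro hpw
    have hpt : t.Pairwise (fun a b => key b ≤ key a) := hpw.tail
    have hht : ∀ y ∈ t, key y ≤ key h := fun y hy => (List.pairwise_cons.mp hpw).1 y hy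
    by_cases hb : key h < key w
    · -- w goes to the front
      have hfront : ∀ M : List (List Char), (∀ y ∈ M, key y ≤ key h) →
          PySem.List.insertBy (fun a b => decide (key b < key a)) w M = w :: M := by
        intro M hM
        cases M with
        | nil => rfl
        | cons z r =>
          have : key z < key w := lt_of_le_of_lt (hM z (by simp)) hb
          simp [PySem.List.insertBy, this]
      have h1 : PySem.List.insertBy (fun a b => decide (key b < key a)) w (h :: t) = w :: h :: t := by
        simp [PySem.List.insertBy, hb]
      by_cases hp : p w
      · have hmem : ∀ y ∈ (h :: t).filter p, key y ≤ key h := by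
          intro y hy
          have hy' := List.mem_of_mem_filter hy
          rcases List.mem_cons.mp hy' with rfl | hy''
          · exact le_refl _
          · exact hht y hy''
        rw [h1, List.filter_cons, if_pos hp, if_pos hp, hfront _ hmem]
      · rw [h1, List.filter_cons, if_neg hp, if_neg hp]
    · -- w goes into the tail
      have h1 : PySem.List.insertBy (fun a b => decide (key b < key a)) w (h :: t)
          = h :: PySem.List.insertBy (fun a b => decide (key b < key a)) w t := by
        simp [PySem.List.insertBy, hb]
      rw [h1]
      by_cases hp : p w <;> by_cases hph : p h <;>
        simp [hp, hph, ih hpt, PySem.List.insertBy, hb]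

-- stable reverse sort commutes with filter
lemma filter_sortedRev (p : List Char → Bool) (key : List Char → Int) (xs : List (List Char)) :
    (PySem.List.sorted xs key true).filter p = PySem.List.sorted (xs.filter p) key true := by
  induction xs using List.reverseRecOn with
  | nil => rfl
  | append_singleton t w ih =>
    have hs := PySem.List.sorted_pairwise_rev (κ := Int) t key
    have hL : PySem.List.sorted (t ++ [w]) key true
        = PySem.List.insertBy (fun a b => decide (key b < key a)) w (PySem.List.sorted t key true) := by
      rw [PySem.List.sorted_rev_eq_foldl_insertBy, List.foldl_append, List.foldl_cons,
          List.foldl_nil, ← PySem.List.sorted_rev_eq_foldl_insertBy]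
    rw [hL, filter_insertBy p key w _ hs, ih]
    by_cases hp : p w
    · have hR : (t ++ [w]).filter p = t.filter p ++ [w] := by simp [List.filter_append, hp]
      have hL2 : PySem.List.sorted (t.filter p ++ [w]) key true
          = PySem.List.insertBy (fun a b => decide (key b < key a)) w (PySem.List.sorted (t.filter p) key true) := by
        rw [PySem.List.sorted_rev_eq_foldl_insertBy, List.foldl_append, List.foldl_cons,
            List.foldl_nil, ← PySem.List.sorted_rev_eq_foldl_insertBy]
      rw [if_pos hp, hR, hL2]
    · have hR : (t ++ [w]).filter p = t.filter p := by simp [List.filter_append, hp]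
      rw [if_neg hp, hR]

-- the simplified fold computes (length, value) of the head of the reverse-sorted list
lemma fold_eq_head (ys : List (List Char)) :
    ys.foldl pvStep' (0, [])
      = ((((PySem.List.sorted ys (fun w => (w.length : Int)) true).headD []).length : Int),
          (PySem.List.sorted ys (fun w => (w.length : Int)) true).headD []) := by
  induction ys using List.reverseRecOn with
  | nil => simp [PySem.List.sorted, List.foldl]
  | append_singleton t w ih =>
    have hL : PySem.List.sorted (t ++ [w]) (fun w => (w.length : Int)) true
        = PySem.List.insertBy (fun a b => decide ((b.length : Int) < (a.length : Int))) w
            (PySem.List.sorted t (fun w => (w.length : Int)) true) := by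
      rw [PySem.List.sorted_rev_eq_foldl_insertBy, List.foldl_append, List.foldl_cons,
          List.foldl_nil, ← PySem.List.sorted_rev_eq_foldl_insertBy]
    rw [List.foldl_append, List.foldl_cons, List.foldl_nil, ih, hL]
    cases hS : PySem.List.sorted t (fun w => (w.length : Int)) true with
    | nil =>
      by_cases hw : (0 : Int) < (w.length : Int)
      · have h2 : PySem.List.insertBy (fun a b => decide ((b.length : Int) < (a.length : Int))) w ([] : List (List Char)) = [w] := by
          simp [PySem.List.insertBy]
        rw [h2]
        have h3 : pvStep' ((((List.nil (α := List Char)).headD []).length : Int), (List.nil (α := List Char)).headD []) w = ((w.length : Int), w) := by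
          simp [pvStep', hw]
          intro h
          subst h
          simp at hw
        rw [h3]
        simp
      · have hw0 : w = [] := List.length_eq_zero_iff.mp (by omega)
        subst hw0
        simp [PySem.List.insertBy, pvStep']
    | cons h tl =>
      by_cases hb : (h.length : Int) < (w.length : Int)
      · have h1 : PySem.List.insertBy (fun a b => decide ((b.length : Int) < (a.length : Int))) w (h :: tl) = w :: h :: tl := by
          simp [PySem.List.insertBy, hb]
        rw [h1]
        have h2 : pvStep' ((((h :: tl).headD []).length : Int), (h :: tl).headD []) w = ((w.length : Int), w) := by
          simp [pvStep', hb]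
        rw [h2]
        simp
      · have h1 : PySem.List.insertBy (fun a b => decide ((b.length : Int) < (a.length : Int))) w (h :: tl)
            = h :: PySem.List.insertBy (fun a b => decide ((b.length : Int) < (a.length : Int))) w tl := by
          simp [PySem.List.insertBy, hb]
        rw [h1]
        have h2 : pvStep' ((((h :: tl).headD []).length : Int), (h :: tl).headD []) w
            = ((((h :: tl).headD []).length : Int), (h :: tl).headD []) := by
          have : ¬ ((w.length : Int) > (((h :: tl).headD []).length : Int)) := by
            simp only [List.headD_cons]
            omega
          simp [pvStep', this]
          intro hlt
          omega
        rw [h2]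
        simp

-- ===== VERDICT (by name: the statement is the Claim_ definition above) =====
theorem getLongestWordWithDistinctLetters_spec : Claim_equal_getLongestWordWithDistinctLetters := by
  intro word_array _
  show getLongestWordWithDistinctLetters word_array = getLongestWordWithDistinctLetters_alt word_array
  have hA : getLongestWordWithDistinctLetters word_array
      = String.ofList ((((word_array.map pvCleanB).filter pvDistinctB).foldl pvStep' (0, [])).2) := by
    unfold getLongestWordWithDistinctLetters
    rw [show (word_array.foldl
        (fun (st : Int × List Char) word =>
          let w := word.toList.filter PySem.Chars.isalpha
          let w := w.map PySem.Chars.upperChar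
          if decide ((w.length : Int) > st.1) && isUniqueChars w then ((w.length : Int), w) else st)
        (0, []))
      = ((word_array.map pvCleanB).foldl
          (fun (st : Int × List Char) w =>
            if decide ((w.length : Int) > st.1) && isUniqueChars w then ((w.length : Int), w) else st)
          (0, [])) by
        rw [List.foldl_map]
        rfl]
    rw [foldl_filter_uniq]
  have hB : getLongestWordWithDistinctLetters_alt word_array
      = match ((PySem.List.sorted (word_array.map pvCleanB) (fun w => (w.length : Int)) true).filter pvDistinctB).head? with
        | some word => String.ofList word
        | none => "" := by
    simp only [getLongestWordWithDistinctLetters_alt]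
    rw [← List.head?_filter]
  rw [hA, fold_eq_head, hB, filter_sortedRev]
  cases hs : PySem.List.sorted ((word_array.map pvCleanB).filter pvDistinctB) (fun w => (w.length : Int)) true with
  | nil => rfl
  | cons h tl => rfl
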